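-- pv_equiv track=rewrite | github.com/Vikseko/PyDJD | Intervals.py | _encode_leq
-- ===== SOURCE A (Python) =====
-- def _encode_leq(x, b):
--     assert len(x) == len(b)
--     if len(x) == 0:
--         return []
--     clauses = []
--     assert isinstance(b[0], bool)
--     if not b[0]:
--         clauses.append([-x[0]])
--         clauses.extend(_encode_leq(x[1:], b[1:]))
--     else:
--         # Append (x=0) to all sub-clauses:
--         for clause in _encode_leq(x[1:], b[1:]):
--             clauses.append([-x[0]] + clause)
--     return clauses
-- ===== SOURCE B (Python) =====
-- def _encode_leq(x, b):
--     assert len(x) == len(b)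
--     prefix = []
--     clauses = []
--     for xi, bi in zip(x, b):
--         assert isinstance(bi, bool)
--         if bi:
--             prefix.append(-xi)
--         else:
--             clauses.append(prefix + [-xi])
--     return clauses
-- ===== Notes on version B (the rewrite author's own statement) =====
-- stated objective: faster
-- what changed: Replaced the recursion that re-prefixes every sub-clause at each True bit (quadratic copying) by one forward pass keeping a running list of negated True-literals and emitting one clause per False bit.
import Mathlib
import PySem

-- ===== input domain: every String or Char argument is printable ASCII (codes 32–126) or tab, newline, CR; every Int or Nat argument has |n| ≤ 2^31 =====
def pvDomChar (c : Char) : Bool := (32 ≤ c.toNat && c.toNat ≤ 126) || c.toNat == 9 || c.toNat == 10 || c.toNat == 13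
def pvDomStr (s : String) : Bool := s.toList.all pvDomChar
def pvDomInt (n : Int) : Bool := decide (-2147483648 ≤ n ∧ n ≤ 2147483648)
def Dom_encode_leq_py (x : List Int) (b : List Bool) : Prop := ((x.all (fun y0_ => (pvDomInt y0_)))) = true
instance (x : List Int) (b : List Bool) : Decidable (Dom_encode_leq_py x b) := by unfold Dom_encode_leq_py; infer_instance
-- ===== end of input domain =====

-- One line: B replaces A's recursion (which re-prefixes all sub-clauses at each True bit)
-- by a single forward pass carrying the running prefix of negated True-literals (faster).

-- ===== PORT A =====
-- literal transliteration of the recursive _encode_leq; the Pre_ (equal lengths) makes the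
-- mismatched-length case (Python AssertionError) unreachable, that branch returns [].
def encode_leq_py : (x : List Int) → (b : List Bool) → List (List Int)
  | [], _ => []
  | xh :: xt, bh :: bt =>
    if bh = false then
      [-xh] :: encode_leq_py xt bt
    else
      (encode_leq_py xt bt).map (fun clause => -xh :: clause)
  | _ :: _, [] => []

-- ===== PORT B =====
-- one pass over zip x b with state (prefix, clauses), as in Source B
def encode_leq_py_alt (x : List Int) (b : List Bool) : List (List Int) :=
  ((x.zip b).foldl
    (fun (s : List Int × List (List Int)) p =>
      if p.2 then (s.1 ++ [-p.1], s.2) else (s.1, s.2 ++ [s.1 ++ [-p.1]]))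
    ([], [])).2

-- ===== PRECONDITION & SPEC =====
-- Python A (and B) raise AssertionError when len(x) != len(b); excluded.
def Pre_encode_leq_py (x : List Int) (b : List Bool) : Prop := x.length = b.length
instance (x : List Int) (b : List Bool) : Decidable (Pre_encode_leq_py x b) := by unfold Pre_encode_leq_py; infer_instance
def pvWitness_encode_leq_py : List Int × List Bool := ([1, 2, 3], [true, false, true])

def Spec_encode_leq_py (x : List Int) (b : List Bool) (out : List (List Int)) : Prop := out = encode_leq_py_alt x b
instance (x : List Int) (b : List Bool) (out : List (List Int)) : Decidable (Spec_encode_leq_py x b out) := by unfold Spec_encode_leq_py; infer_instance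

-- ===== CLAIM (what is proved, stated in full; the proofs are below) =====
def Claim_equal_encode_leq_py : Prop := ∀ (x : List Int) (b : List Bool), Dom_encode_leq_py x b → Pre_encode_leq_py x b → Spec_encode_leq_py x b (encode_leq_py x b)

-- ===== LEMMAS AND PROOFS =====

-- ===== VERDICT (by name: the statement is the Claim_ definition above) =====
lemma enc_fold (x : List Int) (b : List Bool) (pre : List Int) (acc : List (List Int)) :
    ((x.zip b).foldl
      (fun (s : List Int × List (List Int)) p =>
        if p.2 then (s.1 ++ [-p.1], s.2) else (s.1, s.2 ++ [s.1 ++ [-p.1]]))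
      (pre, acc)).2
      = acc ++ (encode_leq_py x b).map (fun c => pre ++ c) := by
  induction x generalizing b pre acc with
  | nil => simp [encode_leq_py]
  | cons xh xt ih =>
    simp only [List.zip] at ih ⊢
    cases b with
    | nil => simp [encode_leq_py]
    | cons bh bt =>
      cases bh with
      | false =>
        simp only [List.zipWith, List.foldl, if_neg, Bool.false_eq_true, if_false, encode_leq_py]
        rw [ih]
        simp
      | true =>
        simp only [List.zipWith, List.foldl, if_true, encode_leq_py]
        rw [ih]
        simp [Function.comp, List.append_assoc]

theorem encode_leq_py_spec : Claim_equal_encode_leq_py := by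
  intro x b _ _
  unfold Spec_encode_leq_py encode_leq_py_alt
  rw [enc_fold]
  simp
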